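-- pv_equiv track=rewrite | github.com/creditimpact/finance-platform | backend/frontend/packs/generator.py | _resolve_account_number_consensus
-- ===== SOURCE A (Python) =====
-- from collections import Counter
-- from typing import Any, Iterable, Mapping, Sequence
--
-- _BUREAU_ORDER: tuple[str, ...] = ("transunion", "experian", "equifax")
--
-- def _resolve_account_number_consensus(per_bureau: Mapping[str, str]) -> str:
--     duplicates = set()
--     ordered_values: list[str] = []
--     for bureau in _BUREAU_ORDER:
--         value = per_bureau.get(bureau)
--         if value and value != "--":
--             ordered_values.append(value)
--     if not ordered_values:
--         return "--"
--     counts = Counter(ordered_values)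
--     duplicates = {value for value, count in counts.items() if count >= 2}
--     if duplicates:
--         for bureau in _BUREAU_ORDER:
--             value = per_bureau.get(bureau)
--             if value in duplicates:
--                 return value
--     for bureau in _BUREAU_ORDER:
--         value = per_bureau.get(bureau)
--         if value and value != "--":
--             return value
--     return "--"
-- ===== SOURCE B (Python) =====
-- _BUREAU_ORDER: tuple[str, ...] = ("transunion", "experian", "equifax")
--
-- def _resolve_account_number_consensus(per_bureau):
--     # Only three bureaus exist, so consensus is a couple of direct pairwise
--     # comparisons of the three validated values -- no counting, no rescans.
--     def _valid(bureau):
--         v = per_bureau.get(bureau)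
--         return v if v and v != "--" else None
--
--     tu, ex, eq = (_valid(b) for b in _BUREAU_ORDER)
--     if tu is not None and (tu == ex or tu == eq):
--         return tu
--     if ex is not None and ex == eq:
--         return ex
--     return tu or ex or eq or "--"
-- ===== Notes on version B (the rewrite author's own statement) =====
-- stated objective: simpler
-- what changed: Drops the Counter, the duplicate set and both rescans of per_bureau: since there are exactly three bureaus, B resolves consensus by direct pairwise comparison of the three validated values (tu==ex or tu==eq, then ex==eq) and otherwise falls back to the first present value via 'or'-chaining.
import Mathlib
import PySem

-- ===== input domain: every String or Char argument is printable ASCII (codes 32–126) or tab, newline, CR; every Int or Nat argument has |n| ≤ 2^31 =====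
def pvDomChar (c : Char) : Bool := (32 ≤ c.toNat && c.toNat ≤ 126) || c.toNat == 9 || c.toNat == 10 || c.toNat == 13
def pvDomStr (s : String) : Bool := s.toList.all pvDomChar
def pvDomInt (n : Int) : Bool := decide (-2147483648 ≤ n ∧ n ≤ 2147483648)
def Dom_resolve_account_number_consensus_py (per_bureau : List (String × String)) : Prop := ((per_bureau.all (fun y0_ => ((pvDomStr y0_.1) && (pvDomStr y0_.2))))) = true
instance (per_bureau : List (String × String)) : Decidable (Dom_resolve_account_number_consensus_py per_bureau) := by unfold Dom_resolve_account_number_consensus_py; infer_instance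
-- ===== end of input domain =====

-- B replaces A's Counter/duplicate-set and rescans by direct pairwise comparison of the three validated bureau values; objective: simpler.

-- ===== PORT A =====
def pvBureauOrder : List String := ["transunion", "experian", "equifax"]

-- per_bureau.get(bureau): first-match association lookup
def pvGet (per_bureau : List (String × String)) (b : String) : Option String :=
  (PySem.Dict.mk per_bureau).get? b

-- first loop of A: build ordered_values
def pvOrderedA (per_bureau : List (String × String)) : List String :=
  pvBureauOrder.foldl (fun acc bureau =>
    match pvGet per_bureau bureau with
    | some v => if v ≠ "" ∧ v ≠ "--" then acc ++ [v] else acc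
    | none => acc) []

-- A's rescan 'for bureau in _BUREAU_ORDER: ... if value in duplicates: return value'
def pvScanDup (per_bureau : List (String × String)) (dups : PySem.Set String) :
    List String → Option String
  | [] => none
  | bureau :: rest =>
    match pvGet per_bureau bureau with
    | some v => if PySem.Set.contains dups v then some v else pvScanDup per_bureau dups rest
    | none => pvScanDup per_bureau dups rest

-- A's final rescan 'for bureau in _BUREAU_ORDER: ... if value and value != "--": return value' / trailing "--"
def pvScanVal (per_bureau : List (String × String)) : List String → String
  | [] => "--"
  | bureau :: rest =>
    match pvGet per_bureau bureau with
    | some v => if v ≠ "" ∧ v ≠ "--" then v else pvScanVal per_bureau rest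
    | none => pvScanVal per_bureau rest

def resolve_account_number_consensus_py (per_bureau : List (String × String)) : String :=
  let ordered_values := pvOrderedA per_bureau
  if ordered_values = [] then "--"
  else
    let counts := PySem.Dict.counter ordered_values
    let duplicates : PySem.Set String :=
      PySem.Set.ofList ((counts.items.filter (fun p => p.2 ≥ 2)).map (·.1))
    if duplicates ≠ [] then
      match pvScanDup per_bureau duplicates pvBureauOrder with
      | some v => v
      | none => pvScanVal per_bureau pvBureauOrder   -- loop falls through to the next loop
    else pvScanVal per_bureau pvBureauOrder

-- ===== PORT B =====
-- B's helper _valid(bureau): the bureau's value if present, nonempty and not "--", else None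
def pvValidB (per_bureau : List (String × String)) (b : String) : Option String :=
  match pvGet per_bureau b with
  | some v => if v ≠ "" ∧ v ≠ "--" then some v else none
  | none => none

def resolve_account_number_consensus_py_alt (per_bureau : List (String × String)) : String :=
  let tu := pvValidB per_bureau "transunion"
  let ex := pvValidB per_bureau "experian"
  let eqf := pvValidB per_bureau "equifax"
  if tu.isSome ∧ (tu = ex ∨ tu = eqf) then tu.getD "--"
  else if ex.isSome ∧ ex = eqf then ex.getD "--"
  else (((tu.orElse fun _ => ex).orElse fun _ => eqf)).getD "--"   -- 'tu or ex or eq or "--"' (valid values are truthy)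

-- ===== PRECONDITION & SPEC =====
def Spec_resolve_account_number_consensus_py (per_bureau : List (String × String)) (out : String) : Prop := out = resolve_account_number_consensus_py_alt per_bureau
instance (per_bureau : List (String × String)) (out : String) : Decidable (Spec_resolve_account_number_consensus_py per_bureau out) := by unfold Spec_resolve_account_number_consensus_py; infer_instance

-- ===== CLAIM (what is proved, stated in full; the proofs are below) =====
def Claim_equal_resolve_account_number_consensus_py : Prop := ∀ (per_bureau : List (String × String)), Dom_resolve_account_number_consensus_py per_bureau → Spec_resolve_account_number_consensus_py per_bureau (resolve_account_number_consensus_py per_bureau)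

-- ===== LEMMAS AND PROOFS =====

-- the filtered list of valid bureau values, the common reference point of the proofs
def pvFiltered (per_bureau : List (String × String)) : List String :=
  (pvBureauOrder.filterMap (fun b => pvGet per_bureau b)).filter
    (fun v => v ≠ "" ∧ v ≠ "--")

-- both programs, reduced to the same expression over pvFiltered
def pvCanon (L : List String) : String :=
  match L with
  | [] => "--"
  | v0 :: _ =>
    match L.find? (fun v => decide (2 ≤ L.count v)) with
    | some v => v
    | none => v0

theorem pvOrderedA_loop (per_bureau : List (String × String)) (bs : List String)
    (acc : List String) :
    bs.foldl (fun acc bureau =>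
      match pvGet per_bureau bureau with
      | some v => if v ≠ "" ∧ v ≠ "--" then acc ++ [v] else acc
      | none => acc) acc
    = acc ++ ((bs.filterMap (fun b => pvGet per_bureau b)).filter
        (fun v => v ≠ "" ∧ v ≠ "--")) := by
  induction bs generalizing acc with
  | nil => simp
  | cons b rest ih =>
    simp only [List.foldl_cons, List.filterMap_cons]
    cases hg : pvGet per_bureau b with
    | none => simpa using ih acc
    | some v =>
      by_cases hv : v ≠ "" ∧ v ≠ "--" <;> simp [ih, hv]

theorem pvOrderedA_eq (per_bureau : List (String × String)) :
    pvOrderedA per_bureau = pvFiltered per_bureau := by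
  simpa [pvOrderedA, pvFiltered] using pvOrderedA_loop per_bureau pvBureauOrder []

theorem pvFind?_congr {α : Type} (l : List α) (p q : α → Bool)
    (h : ∀ a ∈ l, p a = q a) : l.find? p = l.find? q := by
  induction l with
  | nil => rfl
  | cons a rest ih =>
    simp only [List.find?_cons]
    rw [h a (List.mem_cons_self)]
    cases q a
    · exact ih fun a ha => h a (List.mem_cons_of_mem _ ha)
    · rfl

theorem pvScanDup_eq (per_bureau : List (String × String)) (dups : PySem.Set String)
    (hd : ∀ v ∈ dups, v ≠ "" ∧ v ≠ "--") (bs : List String) :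
    pvScanDup per_bureau dups bs
    = ((bs.filterMap (fun b => pvGet per_bureau b)).filter
        (fun v => v ≠ "" ∧ v ≠ "--")).find? (fun v => dups.contains v) := by
  induction bs with
  | nil => simp [pvScanDup]
  | cons b rest ih =>
    rw [pvScanDup, List.filterMap_cons]
    cases hg : pvGet per_bureau b with
    | none => simpa using ih
    | some v =>
      by_cases hm : v ∈ dups
      · have hv := hd v hm
        simp [hm, hv]
      · by_cases hv : v ≠ "" ∧ v ≠ "--" <;>
          simp [hm, hv, ih]

theorem pvScanVal_eq (per_bureau : List (String × String)) (bs : List String) :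
    pvScanVal per_bureau bs
    = ((bs.filterMap (fun b => pvGet per_bureau b)).filter
        (fun v => v ≠ "" ∧ v ≠ "--")).headD "--" := by
  induction bs with
  | nil => simp [pvScanVal]
  | cons b rest ih =>
    rw [pvScanVal, List.filterMap_cons]
    cases hg : pvGet per_bureau b with
    | none => simpa using ih
    | some v =>
      by_cases hv : v ≠ "" ∧ v ≠ "--" <;> simp [hv, ih]

-- membership in A's duplicates set
theorem pvMem_duplicates (L : List String) (v : String) :
    v ∈ PySem.Set.ofList
        ((((PySem.Dict.counter L).items.filter (fun p => p.2 ≥ 2)).map (·.1)))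
    ↔ v ∈ L ∧ 2 ≤ L.count v := by
  rw [PySem.Dict.items_counter]
  simp [List.mem_filter, List.mem_map]

theorem pvA_eq_canon (per_bureau : List (String × String)) :
    resolve_account_number_consensus_py per_bureau = pvCanon (pvFiltered per_bureau) := by
  simp only [resolve_account_number_consensus_py]
  rw [pvOrderedA_eq]
  cases hcase : pvFiltered per_bureau with
  | nil => simp [pvCanon]
  | cons v0 tl =>
    rw [if_neg (by simp)]
    simp only [pvCanon]
    set dups : PySem.Set String :=
      PySem.Set.ofList ((((PySem.Dict.counter (v0 :: tl)).items.filter (fun p => p.2 ≥ 2)).map (·.1)))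
      with hdups
    have hmem : ∀ v, v ∈ dups ↔ v ∈ (v0 :: tl) ∧ 2 ≤ (v0 :: tl).count v :=
      fun v => pvMem_duplicates (v0 :: tl) v
    have hd : ∀ v ∈ dups, v ≠ "" ∧ v ≠ "--" := by
      intro v hv
      have hvL : v ∈ pvFiltered per_bureau := hcase ▸ ((hmem v).mp hv).1
      rw [pvFiltered, List.mem_filter] at hvL
      simpa using hvL.2
    have hval : pvScanVal per_bureau pvBureauOrder = v0 := by
      rw [pvScanVal_eq, ← pvFiltered, hcase, List.headD_cons]
    by_cases hne : dups = []
    · rw [if_neg (fun h => h hne)]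
      have hnone : (v0 :: tl).find? (fun v => decide (2 ≤ (v0 :: tl).count v)) = none := by
        refine List.find?_eq_none.mpr (fun x hx => ?_)
        simp only [decide_eq_true_eq]
        intro hc
        exact (List.not_mem_nil (a := x)) (hne ▸ (hmem x).mpr ⟨hx, hc⟩)
      rw [hnone, hval]
    · rw [if_pos hne]
      have hfind : pvScanDup per_bureau dups pvBureauOrder
          = (v0 :: tl).find? (fun v => decide (2 ≤ (v0 :: tl).count v)) := by
        rw [pvScanDup_eq per_bureau dups hd, ← pvFiltered, hcase]
        refine pvFind?_congr _ _ _ (fun a ha => ?_)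
        have : a ∈ dups ↔ 2 ≤ (v0 :: tl).count a := by
          rw [hmem a]; exact ⟨And.right, fun h => ⟨ha, h⟩⟩
        simp [this]
      rw [hfind]
      cases h : (v0 :: tl).find? (fun v => decide (2 ≤ (v0 :: tl).count v)) with
      | some v => rfl
      | none => rw [hval]

-- B's three option values concatenate to pvFiltered
theorem pvValid_flat (per_bureau : List (String × String)) (bs : List String) :
    (bs.filterMap (fun b => pvGet per_bureau b)).filter (fun v => v ≠ "" ∧ v ≠ "--")
    = bs.flatMap (fun b => (pvValidB per_bureau b).toList) := by
  induction bs with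
  | nil => simp
  | cons b rest ih =>
    simp only [List.filterMap_cons, List.flatMap_cons]
    cases hg : pvGet per_bureau b with
    | none => simpa [pvValidB, hg] using ih
    | some v =>
      by_cases h1 : v = ""
      · simp [pvValidB, hg, h1, List.filter_cons]
        simpa using ih
      · by_cases h2 : v = "--"
        · simp [pvValidB, hg, h1, h2, List.filter_cons]
          simpa using ih
        · simp [pvValidB, hg, h1, h2, List.filter_cons]
          simpa using ih

theorem pvFiltered_eq_opts (per_bureau : List (String × String)) :
    pvFiltered per_bureau
    = (pvValidB per_bureau "transunion").toList
      ++ (pvValidB per_bureau "experian").toList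
      ++ (pvValidB per_bureau "equifax").toList := by
  rw [pvFiltered, pvValid_flat]
  simp [pvBureauOrder]

theorem pvB_eq_canon (per_bureau : List (String × String)) :
    resolve_account_number_consensus_py_alt per_bureau = pvCanon (pvFiltered per_bureau) := by
  rw [pvFiltered_eq_opts]
  simp only [resolve_account_number_consensus_py_alt]
  cases htu : pvValidB per_bureau "transunion" with
  | none =>
    cases hex : pvValidB per_bureau "experian" with
    | none =>
      cases heq : pvValidB per_bureau "equifax" with
      | none => simp [pvCanon, Option.orElse]
      | some c => simp [pvCanon, Option.orElse, List.find?, List.count_cons]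
    | some b =>
      cases heq : pvValidB per_bureau "equifax" with
      | none => simp [pvCanon, Option.orElse, List.find?, List.count_cons]
      | some c =>
        by_cases hbc : b = c
        · subst hbc; simp [pvCanon, Option.orElse, List.find?, List.count_cons]
        · simp [pvCanon, Option.orElse, List.find?, List.count_cons, hbc, Ne.symm hbc]
  | some a =>
    cases hex : pvValidB per_bureau "experian" with
    | none =>
      cases heq : pvValidB per_bureau "equifax" with
      | none => simp [pvCanon, Option.orElse, List.find?, List.count_cons]
      | some c =>
        by_cases hac : a = c
        · subst hac; simp [pvCanon, Option.orElse, List.find?, List.count_cons]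
        · simp [pvCanon, Option.orElse, List.find?, List.count_cons, hac, Ne.symm hac]
    | some b =>
      cases heq : pvValidB per_bureau "equifax" with
      | none =>
        by_cases hab : a = b
        · subst hab; simp [pvCanon, Option.orElse, List.find?, List.count_cons]
        · simp [pvCanon, Option.orElse, List.find?, List.count_cons, hab, Ne.symm hab]
      | some c =>
        by_cases hab : a = b
        · subst hab
          by_cases hac : a = c
          · subst hac; simp [pvCanon, Option.orElse, List.find?, List.count_cons]
          · simp [pvCanon, Option.orElse, List.find?, List.count_cons, hac, Ne.symm hac]
        · by_cases hac : a = c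
          · subst hac
            simp [pvCanon, Option.orElse, List.find?, List.count_cons, hab, Ne.symm hab]
          · by_cases hbc : b = c
            · subst hbc
              simp [pvCanon, Option.orElse, List.find?, List.count_cons, hab, Ne.symm hab]
            · simp [pvCanon, Option.orElse, List.find?, List.count_cons, hab, Ne.symm hab,
                hac, Ne.symm hac, hbc, Ne.symm hbc]

-- ===== VERDICT (by name: the statement is the Claim_ definition above) =====
theorem resolve_account_number_consensus_py_spec : Claim_equal_resolve_account_number_consensus_py := by
  intro per_bureau _
  unfold Spec_resolve_account_number_consensus_py
  rw [pvA_eq_canon, pvB_eq_canon]
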